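-- pv_equiv track=rewrite | github.com/manavgup/rag_modulo | backend/rag_solution/services/conversation_service.py | _extract_user_messages_from_context
-- ===== SOURCE A (Python) =====
-- def _extract_user_messages_from_context(context: str) -> str:
--     """Extract only user messages from context, excluding assistant responses.
--
--     This prevents contamination from assistant's verbose responses which contain
--     discourse markers like "Based on", "However", "Additionally" that get
--     incorrectly identified as entities by spaCy's noun chunking.
--
--     Args:
--         context: Full conversation context with both user and assistant messages
--
--     Returns:
--         String containing only user messages, filtered from the context
--
--     Example:
--         Input: "User: What is IBM? Assistant: Based on the analysis..."
--         Output: "What is IBM?"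
--     """
--     if not context or context == "No previous conversation context":
--         return ""
--
--     user_messages = []
--
--     # Split by "Assistant:" to separate sections
--     sections = context.split("Assistant:")
--
--     for section in sections:
--         if "User:" in section:
--             # Extract all user messages from this section
--             user_parts = section.split("User:")
--             for part in user_parts[1:]:  # Skip first split (before first "User:")
--                 user_msg = part.strip()
--                 if user_msg:
--                     user_messages.append(user_msg)
--
--     return " ".join(user_messages)
-- ===== SOURCE B (Python) =====
-- def _extract_user_messages_from_context(context: str) -> str:
--     """Single left-to-right scan: capture text after each 'User:' marker up to
--     the next 'User:'/'Assistant:' marker (or end), strip, drop empties, join."""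
--     if not context or context == "No previous conversation context":
--         return ""
--     out = []
--     cur = None  # None = not inside a user chunk; else list of captured chars
--
--     def flush(cur):
--         if cur is not None:
--             msg = "".join(cur).strip()
--             if msg:
--                 out.append(msg)
--
--     i = 0
--     n = len(context)
--     while i < n:
--         if context.startswith("User:", i):
--             flush(cur)
--             cur = []
--             i += 5
--         elif context.startswith("Assistant:", i):
--             flush(cur)
--             cur = None
--             i += 10
--         else:
--             if cur is not None:
--                 cur.append(context[i])
--             i += 1
--     flush(cur)
--     return " ".join(out)
-- ===== Notes on version B (the rewrite author's own statement) =====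
-- stated objective: alternative
-- what changed: Replaces A's nested split('Assistant:')/split('User:') passes with a single left-to-right scan that captures text after each 'User:' marker up to the next 'User:'/'Assistant:' marker or end of string.
import Mathlib
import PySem

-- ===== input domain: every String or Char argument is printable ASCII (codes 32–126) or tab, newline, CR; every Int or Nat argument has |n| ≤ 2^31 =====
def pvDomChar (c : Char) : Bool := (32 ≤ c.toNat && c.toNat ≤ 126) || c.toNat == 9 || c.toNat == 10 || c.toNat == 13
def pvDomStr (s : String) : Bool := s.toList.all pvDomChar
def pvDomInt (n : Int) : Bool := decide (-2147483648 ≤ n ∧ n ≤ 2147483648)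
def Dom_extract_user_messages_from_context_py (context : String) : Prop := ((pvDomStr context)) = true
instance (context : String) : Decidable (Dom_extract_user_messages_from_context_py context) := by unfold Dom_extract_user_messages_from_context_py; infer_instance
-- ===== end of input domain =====

-- B replaces A's nested "Assistant:"/"User:" splits by a single left-to-right scan that
-- captures text after each "User:" marker up to the next marker (objective: alternative).

-- The two marker strings, as char lists (both ports use them).
def pvU : List Char := ['U', 's', 'e', 'r', ':']
def pvA : List Char := ['A', 's', 's', 'i', 's', 't', 'a', 'n', 't', ':']

-- ===== PORT A =====
def extract_user_messages_from_context_py (context : String) : String :=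
  if context = "" ∨ context = "No previous conversation context" then ""
  else
    let sections := PySem.Chars.splitOn context.toList pvA
    let user_messages := sections.foldl (fun acc sec =>
      if PySem.Chars.isIn pvU sec then
        let user_parts := PySem.Chars.splitOn sec pvU
        (user_parts.drop 1).foldl (fun acc part =>
          let user_msg := PySem.Chars.strip part
          if user_msg ≠ [] then acc ++ [user_msg] else acc) acc
      else acc) ([] : List (List Char))
    String.ofList (PySem.Chars.join [' '] user_messages)

-- ===== PORT B =====
-- flush(cur) of Source B
def pvFlushB (cur : Option (List Char)) (out : List (List Char)) : List (List Char) :=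
  match cur with
  | none => out
  | some cs =>
      let msg := PySem.Chars.strip cs
      if msg ≠ [] then out ++ [msg] else out

-- the while loop of Source B: position i is the remaining suffix `l`
def pvScanB (l : List Char) (cur : Option (List Char)) (out : List (List Char)) :
    List (List Char) :=
  match l with
  | [] => pvFlushB cur out
  | c :: rest =>
      if pvU.isPrefixOf (c :: rest) then
        pvScanB (rest.drop 4) (some []) (pvFlushB cur out)
      else if pvA.isPrefixOf (c :: rest) then
        pvScanB (rest.drop 9) none (pvFlushB cur out)
      else
        pvScanB rest (cur.map (fun cs => cs ++ [c])) out
termination_by l.length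
decreasing_by all_goals (simp; try omega)

def extract_user_messages_from_context_py_alt (context : String) : String :=
  if context = "" ∨ context = "No previous conversation context" then ""
  else String.ofList (PySem.Chars.join [' '] (pvScanB context.toList none []))

-- ===== PRECONDITION & SPEC =====
def Spec_extract_user_messages_from_context_py (context : String) (out : String) : Prop := out = extract_user_messages_from_context_py_alt context
instance (context : String) (out : String) : Decidable (Spec_extract_user_messages_from_context_py context out) := by unfold Spec_extract_user_messages_from_context_py; infer_instance

-- ===== CLAIM (what is proved, stated in full; the proofs are below) =====
def Claim_equal_extract_user_messages_from_context_py : Prop := ∀ (context : String), Dom_extract_user_messages_from_context_py context → Spec_extract_user_messages_from_context_py context (extract_user_messages_from_context_py context)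

-- ===== LEMMAS AND PROOFS =====

-- prepend `pre` to the first piece of a split result
def pvPre (pre : List Char) : List (List Char) → List (List Char)
  | [] => [pre]
  | h :: t => (pre ++ h) :: t

-- structural characterisation of PySem.Chars.splitOn (for nonempty sep)
def pvSplit (sep : List Char) : List Char → List (List Char)
  | [] => [[]]
  | c :: rest =>
      if sep.isPrefixOf (c :: rest) then
        [] :: pvSplit sep (rest.drop (sep.length - 1))
      else
        pvPre [c] (pvSplit sep rest)
termination_by l => l.length
decreasing_by all_goals (simp; try omega)

theorem pvPre_ne_nil (pre : List Char) (s : List (List Char)) : pvPre pre s ≠ [] := by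
  cases s <;> simp [pvPre]

theorem pvPre_nil (s : List (List Char)) (h : s ≠ []) : pvPre [] s = s := by
  cases s <;> simp_all [pvPre]

theorem pvPre_pvPre (a b : List Char) (s : List (List Char)) :
    pvPre a (pvPre b s) = pvPre (a ++ b) s := by
  cases s <;> simp [pvPre]

theorem pvSplit_ne_nil (sep l) : pvSplit sep l ≠ [] := by
  cases l with
  | nil => simp [pvSplit]
  | cons c rest =>
      rw [pvSplit]
      split
      · simp
      · exact pvPre_ne_nil _ _

theorem pvGo_eq (sep : List Char) (hsep : sep ≠ []) :
    ∀ fuel l cur acc, l.length < fuel →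
      PySem.Chars.splitOn.go sep fuel l cur acc =
        acc.reverse ++ pvPre cur.reverse (pvSplit sep l) := by
  intro fuel
  induction fuel with
  | zero => intro l cur acc h; omega
  | succ n ih =>
      intro l cur acc h
      cases l with
      | nil =>
          rw [PySem.Chars.splitOn.go]
          · simp [pvSplit, pvPre]
          · intro hc; omega
      | cons c rest =>
          rw [PySem.Chars.splitOn.go.eq_def]
          simp only []
          rw [pvSplit]
          by_cases hp : sep.isPrefixOf (c :: rest) = true
          · simp only [hp, if_true]
            cases sep with
            | nil => exact absurd rfl hsep
            | cons s0 stl =>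
                rw [ih]
                · have hd : List.drop (s0 :: stl).length (c :: rest) =
                      rest.drop ((s0 :: stl).length - 1) := by
                    simp
                  simp only [hd, List.reverse_nil]
                  rw [pvPre_nil _ (pvSplit_ne_nil _ _)]
                  cases hs : pvSplit (s0 :: stl) (rest.drop ((s0 :: stl).length - 1)) with
                  | nil => exact absurd hs (pvSplit_ne_nil _ _)
                  | cons a b => simp [pvPre]
                · simp at h ⊢; omega
          · rw [if_neg hp, if_neg hp]
            rw [ih _ _ _ (by simp at h; omega)]
            rw [pvPre_pvPre]
            simp

theorem pvSplit_eq_splitOn (sep l : List Char) (h : sep ≠ []) :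
    PySem.Chars.splitOn l sep = pvSplit sep l := by
  rw [PySem.Chars.splitOn, pvGo_eq sep h (l.length + 1) l [] [] (by omega)]
  simp [pvPre_nil _ (pvSplit_ne_nil sep l)]

-- grab: text before the next marker, and the rest (starting at a marker, or empty)
def pvGrab : List Char → List Char × List Char
  | [] => ([], [])
  | c :: rest =>
      if pvU.isPrefixOf (c :: rest) ∨ pvA.isPrefixOf (c :: rest) then ([], c :: rest)
      else ((c :: (pvGrab rest).1, (pvGrab rest).2))

theorem pvGrab_snd_le (l : List Char) : (pvGrab l).2.length ≤ l.length := by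
  induction l with
  | nil => simp [pvGrab]
  | cons c rest ih =>
      rw [pvGrab]
      split
      · simp
      · simpa using Nat.le_succ_of_le ih

-- the user chunks of the context, in order (common specification of both ports)
def pvChunks (l : List Char) : List (List Char) :=
  match l with
  | [] => []
  | c :: rest =>
      if pvU.isPrefixOf (c :: rest) then
        (pvGrab (rest.drop 4)).1 :: pvChunks (pvGrab (rest.drop 4)).2
      else if pvA.isPrefixOf (c :: rest) then
        pvChunks (rest.drop 9)
      else
        pvChunks rest
termination_by l.length
decreasing_by all_goals first
  | (have h1 := pvGrab_snd_le (rest.drop 4)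
     have h2 : (List.drop 4 rest).length = rest.length - 4 := List.length_drop
     simp_all; omega)
  | simp

-- strip every chunk, keep the nonempty ones
def pvPost (cs : List (List Char)) : List (List Char) :=
  (cs.filter (fun part => decide (PySem.Chars.strip part ≠ []))).map PySem.Chars.strip

-- what A computes before strip/filter
def pvF (l : List Char) : List (List Char) :=
  (pvSplit pvA l).flatMap (fun sec => (pvSplit pvU sec).tail)

def pvG (l : List Char) : List (List Char) :=
  pvSplit pvU ((pvSplit pvA l).headI) ++
    ((pvSplit pvA l).tail).flatMap (fun sec => (pvSplit pvU sec).tail)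

-- targeted unfolding lemmas (explicit-cons forms, so rw never touches a variable occurrence)
theorem pvSplit_nil (sep : List Char) : pvSplit sep [] = [[]] := by rw [pvSplit]

theorem pvSplit_cons_pos (sep : List Char) (c : Char) (rest : List Char)
    (h : sep.isPrefixOf (c :: rest) = true) :
    pvSplit sep (c :: rest) = [] :: pvSplit sep (rest.drop (sep.length - 1)) := by
  rw [pvSplit, if_pos h]

theorem pvSplit_cons_neg (sep : List Char) (c : Char) (rest : List Char)
    (h : ¬ sep.isPrefixOf (c :: rest) = true) :
    pvSplit sep (c :: rest) = pvPre [c] (pvSplit sep rest) := by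
  rw [pvSplit, if_neg h]

theorem pvNpU (c : Char) (x : List Char) (h : c ≠ 'U') : ¬ pvU.isPrefixOf (c :: x) = true := by
  simp [pvU, List.isPrefixOf]
  intro h'
  exact absurd h'.symm h

theorem pvNpA (c : Char) (x : List Char) (h : c ≠ 'A') : ¬ pvA.isPrefixOf (c :: x) = true := by
  simp [pvA, List.isPrefixOf]
  intro h'
  exact absurd h'.symm h

theorem pvPrefU (r : List Char) :
    pvU.isPrefixOf ('U' :: 's' :: 'e' :: 'r' :: ':' :: r) = true :=
  List.isPrefixOf_iff_prefix.mpr ⟨r, rfl⟩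

theorem pvPrefA (r : List Char) :
    pvA.isPrefixOf ('A' :: 's' :: 's' :: 'i' :: 's' :: 't' :: 'a' :: 'n' :: 't' :: ':' :: r) = true :=
  List.isPrefixOf_iff_prefix.mpr ⟨r, rfl⟩

theorem pvR_UU (r : List Char) :
    pvSplit pvU ('U' :: 's' :: 'e' :: 'r' :: ':' :: r) = [] :: pvSplit pvU r :=
  pvSplit_cons_pos pvU 'U' _ (pvPrefU r)

theorem pvR_AA (r : List Char) :
    pvSplit pvA ('A' :: 's' :: 's' :: 'i' :: 's' :: 't' :: 'a' :: 'n' :: 't' :: ':' :: r) =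
      [] :: pvSplit pvA r :=
  pvSplit_cons_pos pvA 'A' _ (pvPrefA r)

theorem pvR_AU (r : List Char) :
    pvSplit pvA ('U' :: 's' :: 'e' :: 'r' :: ':' :: r) = pvPre pvU (pvSplit pvA r) := by
  rw [pvSplit_cons_neg _ _ _ (pvNpA 'U' _ (by decide)),
      pvSplit_cons_neg _ _ _ (pvNpA 's' _ (by decide)),
      pvSplit_cons_neg _ _ _ (pvNpA 'e' _ (by decide)),
      pvSplit_cons_neg _ _ _ (pvNpA 'r' _ (by decide)),
      pvSplit_cons_neg _ _ _ (pvNpA ':' _ (by decide)),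
      pvPre_pvPre, pvPre_pvPre, pvPre_pvPre, pvPre_pvPre]
  rfl

theorem pvSplit_headI_prefix (sep l : List Char) : (pvSplit sep l).headI <+: l := by
  induction hn : l.length using Nat.strong_induction_on generalizing l with
  | _ n ih =>
      cases l with
      | nil => simp [pvSplit_nil]
      | cons c rest =>
          by_cases hp : sep.isPrefixOf (c :: rest) = true
          · rw [pvSplit_cons_pos _ _ _ hp]
            simp
          · rw [pvSplit_cons_neg _ _ _ hp]
            cases hs : pvSplit sep rest with
            | nil => exact absurd hs (pvSplit_ne_nil _ _)
            | cons a b =>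
                have hlt : rest.length < n := by
                  simp only [List.length_cons] at hn; omega
                have := ih rest.length hlt rest rfl
                rw [hs] at this
                simp only [pvPre, List.headI] at this ⊢
                exact List.cons_prefix_cons.mpr ⟨rfl, this⟩

theorem pvSplit_of_not_isIn (sep l : List Char) (h : PySem.Chars.isIn sep l = false) :
    pvSplit sep l = [l] := by
  induction l with
  | nil => exact pvSplit_nil sep
  | cons c rest ih =>
      have hinf := (PySem.Chars.isIn_eq_false_iff sep (c :: rest)).mp h
      have hp : ¬ sep.isPrefixOf (c :: rest) = true := by
        intro hp
        exact hinf (List.isPrefixOf_iff_prefix.mp hp).isInfix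
      rw [pvSplit_cons_neg _ _ _ hp,
          ih ((PySem.Chars.isIn_eq_false_iff sep rest).mpr
            (fun hi => hinf (List.infix_cons hi)))]
      simp [pvPre]

-- pvGrab / pvChunks unfolding lemmas
theorem pvGrab_nil : pvGrab [] = ([], []) := rfl

theorem pvGrab_cons_pos (c : Char) (rest : List Char)
    (h : pvU.isPrefixOf (c :: rest) = true ∨ pvA.isPrefixOf (c :: rest) = true) :
    pvGrab (c :: rest) = ([], c :: rest) := by
  rw [pvGrab, if_pos h]

theorem pvGrab_cons_neg (c : Char) (rest : List Char)
    (h1 : ¬ pvU.isPrefixOf (c :: rest) = true) (h2 : ¬ pvA.isPrefixOf (c :: rest) = true) :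
    pvGrab (c :: rest) = (c :: (pvGrab rest).1, (pvGrab rest).2) := by
  rw [pvGrab, if_neg (by rintro (h | h) <;> [exact h1 h; exact h2 h])]

theorem pvChunks_nil : pvChunks [] = [] := by rw [pvChunks]

theorem pvChunks_U (r : List Char) :
    pvChunks ('U' :: 's' :: 'e' :: 'r' :: ':' :: r) =
      (pvGrab r).1 :: pvChunks (pvGrab r).2 := by
  conv_lhs => rw [pvChunks]
  rw [if_pos (pvPrefU r), show List.drop 4 ('s' :: 'e' :: 'r' :: ':' :: r) = r from rfl]

theorem pvChunks_A (r : List Char) :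
    pvChunks ('A' :: 's' :: 's' :: 'i' :: 's' :: 't' :: 'a' :: 'n' :: 't' :: ':' :: r) =
      pvChunks r := by
  conv_lhs => rw [pvChunks]
  rw [if_neg (pvNpU 'A' _ (by decide)), if_pos (pvPrefA r),
      show List.drop 9 ('s' :: 's' :: 'i' :: 's' :: 't' :: 'a' :: 'n' :: 't' :: ':' :: r) = r from rfl]

theorem pvChunks_C (c : Char) (rest : List Char)
    (h1 : ¬ pvU.isPrefixOf (c :: rest) = true) (h2 : ¬ pvA.isPrefixOf (c :: rest) = true) :
    pvChunks (c :: rest) = pvChunks rest := by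
  conv_lhs => rw [pvChunks]
  rw [if_neg h1, if_neg h2]

-- pvPre bookkeeping
theorem pvPre_headI (pre : List Char) (s : List (List Char)) (h : s ≠ []) :
    (pvPre pre s).headI = pre ++ s.headI := by
  cases s <;> simp_all [pvPre]

theorem pvPre_tail (pre : List Char) (s : List (List Char)) (h : s ≠ []) :
    (pvPre pre s).tail = s.tail := by
  cases s <;> simp_all [pvPre]

theorem pvMain (l : List Char) :
    pvF l = pvChunks l ∧ pvG l = (pvGrab l).1 :: pvChunks (pvGrab l).2 := by
  induction hn : l.length using Nat.strong_induction_on generalizing l with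
  | _ n ih =>
      cases l with
      | nil =>
          constructor
          · simp [pvF, pvChunks_nil, pvSplit_nil]
          · simp [pvG, pvGrab_nil, pvChunks_nil, pvSplit_nil]
      | cons c rest =>
          by_cases hU : pvU.isPrefixOf (c :: rest) = true
          · obtain ⟨r, hr⟩ := List.isPrefixOf_iff_prefix.mp hU
            have hr' : c :: rest = 'U' :: 's' :: 'e' :: 'r' :: ':' :: r := hr.symm
            rw [hr'] at hn ⊢
            have hlen : r.length < n := by
              simp only [List.length_cons] at hn; omega
            have IH := ih r.length hlen r rfl
            constructor
            · rw [pvF, pvR_AU, pvChunks_U]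
              cases hs : pvSplit pvA r with
              | nil => exact absurd hs (pvSplit_ne_nil _ _)
              | cons h0 t =>
                  have hh : pvPre pvU (h0 :: t) = ('U' :: 's' :: 'e' :: 'r' :: ':' :: h0) :: t := rfl
                  rw [hh]
                  simp only [List.flatMap_cons, pvR_UU, List.tail_cons]
                  have hG := IH.2
                  rw [pvG, hs] at hG
                  simpa using hG
            · rw [pvG, pvR_AU,
                  pvPre_headI _ _ (pvSplit_ne_nil _ _),
                  pvPre_tail _ _ (pvSplit_ne_nil _ _)]
              rw [show pvU ++ (pvSplit pvA r).headI =
                    'U' :: 's' :: 'e' :: 'r' :: ':' :: (pvSplit pvA r).headI from rfl,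
                  pvR_UU,
                  pvGrab_cons_pos _ _ (Or.inl (pvPrefU r)),
                  pvChunks_U]
              have hG := IH.2
              rw [pvG] at hG
              simpa using hG
          · by_cases hA : pvA.isPrefixOf (c :: rest) = true
            · obtain ⟨r, hr⟩ := List.isPrefixOf_iff_prefix.mp hA
              have hr' : c :: rest =
                  'A' :: 's' :: 's' :: 'i' :: 's' :: 't' :: 'a' :: 'n' :: 't' :: ':' :: r := hr.symm
              rw [hr'] at hn ⊢
              have hlen : r.length < n := by
                simp only [List.length_cons] at hn; omega
              have IH := ih r.length hlen r rfl
              constructor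
              · rw [pvF, pvR_AA, pvChunks_A]
                simp only [List.flatMap_cons, pvSplit_nil, List.tail_cons, List.nil_append]
                exact IH.1
              · rw [pvG, pvR_AA,
                    pvGrab_cons_pos _ _ (Or.inr (pvPrefA r)),
                    pvChunks_A]
                simp only [List.headI_cons, pvSplit_nil, List.tail_cons]
                have hF := IH.1
                rw [pvF] at hF
                simpa [List.flatMap] using hF
            · have hlen : rest.length < n := by
                simp only [List.length_cons] at hn; omega
              have IH := ih rest.length hlen rest rfl
              have hpr : ¬ pvU.isPrefixOf (c :: (pvSplit pvA rest).headI) = true := by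
                intro hp
                exact hU (List.isPrefixOf_iff_prefix.mpr
                  ((List.isPrefixOf_iff_prefix.mp hp).trans
                    (List.cons_prefix_cons.mpr ⟨rfl, pvSplit_headI_prefix pvA rest⟩)))
              constructor
              · rw [pvF, pvSplit_cons_neg _ _ _ hA, pvChunks_C _ _ hU hA]
                cases hs : pvSplit pvA rest with
                | nil => exact absurd hs (pvSplit_ne_nil _ _)
                | cons h0 t =>
                    have hh : pvPre [c] (h0 :: t) = (c :: h0) :: t := rfl
                    rw [hh]
                    simp only [List.flatMap_cons]
                    have hpr' : ¬ pvU.isPrefixOf (c :: h0) = true := by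
                      have : (pvSplit pvA rest).headI = h0 := by rw [hs]; rfl
                      rw [← this]; exact hpr
                    rw [pvSplit_cons_neg _ _ _ hpr',
                        pvPre_tail _ _ (pvSplit_ne_nil _ _)]
                    have hF := IH.1
                    rw [pvF, hs] at hF
                    simpa using hF
              · rw [pvG, pvSplit_cons_neg _ _ _ hA,
                    pvPre_headI _ _ (pvSplit_ne_nil _ _),
                    pvPre_tail _ _ (pvSplit_ne_nil _ _)]
                rw [show [c] ++ (pvSplit pvA rest).headI = c :: (pvSplit pvA rest).headI from rfl,
                    pvSplit_cons_neg _ _ _ hpr,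
                    pvGrab_cons_neg _ _ hU hA]
                have hG := IH.2
                rw [pvG] at hG
                cases hs : pvSplit pvU (pvSplit pvA rest).headI with
                | nil => exact absurd hs (pvSplit_ne_nil _ _)
                | cons h0 t =>
                    rw [hs] at hG
                    have hh : pvPre [c] (h0 :: t) = (c :: h0) :: t := rfl
                    rw [hh]
                    simp only [List.cons_append] at hG ⊢
                    rw [List.cons.injEq] at hG ⊢
                    exact ⟨by rw [hG.1], hG.2⟩

-- single-chunk contribution
def pvPost1 (a : List Char) : List (List Char) :=
  if PySem.Chars.strip a ≠ [] then [PySem.Chars.strip a] else []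

theorem pvPost_nil : pvPost [] = [] := rfl

theorem pvPost_cons (a : List Char) (cs : List (List Char)) :
    pvPost (a :: cs) = pvPost1 a ++ pvPost cs := by
  by_cases h : PySem.Chars.strip a = [] <;> simp [pvPost, pvPost1, h]

theorem pvPost_append (a b : List (List Char)) :
    pvPost (a ++ b) = pvPost a ++ pvPost b := by
  simp [pvPost, List.filter_append]

theorem pvPost_flatMap (ss : List (List Char)) (g : List Char → List (List Char)) :
    ss.flatMap (fun sec => pvPost (g sec)) = pvPost (ss.flatMap g) := by
  induction ss with
  | nil => rfl
  | cons a t ih => simp only [List.flatMap_cons, pvPost_append, ih]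

theorem pvFlushB_none (out : List (List Char)) : pvFlushB none out = out := rfl

theorem pvFlushB_some (cur : List Char) (out : List (List Char)) :
    pvFlushB (some cur) out = out ++ pvPost1 cur := by
  by_cases h : PySem.Chars.strip cur = [] <;> simp [pvFlushB, pvPost1, h]

-- scanner unfolding lemmas
theorem pvScanB_nil (cur : Option (List Char)) (out : List (List Char)) :
    pvScanB [] cur out = pvFlushB cur out := by rw [pvScanB]

theorem pvScanB_U (r : List Char) (cur : Option (List Char)) (out : List (List Char)) :
    pvScanB ('U' :: 's' :: 'e' :: 'r' :: ':' :: r) cur out =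
      pvScanB r (some []) (pvFlushB cur out) := by
  conv_lhs => rw [pvScanB]
  rw [if_pos (pvPrefU r), show List.drop 4 ('s' :: 'e' :: 'r' :: ':' :: r) = r from rfl]

theorem pvScanB_A (r : List Char) (cur : Option (List Char)) (out : List (List Char)) :
    pvScanB ('A' :: 's' :: 's' :: 'i' :: 's' :: 't' :: 'a' :: 'n' :: 't' :: ':' :: r) cur out =
      pvScanB r none (pvFlushB cur out) := by
  conv_lhs => rw [pvScanB]
  rw [if_neg (pvNpU 'A' _ (by decide)), if_pos (pvPrefA r),
      show List.drop 9 ('s' :: 's' :: 'i' :: 's' :: 't' :: 'a' :: 'n' :: 't' :: ':' :: r) = r from rfl]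

theorem pvScanB_C (c : Char) (rest : List Char) (cur : Option (List Char))
    (out : List (List Char))
    (h1 : ¬ pvU.isPrefixOf (c :: rest) = true) (h2 : ¬ pvA.isPrefixOf (c :: rest) = true) :
    pvScanB (c :: rest) cur out = pvScanB rest (cur.map (fun cs => cs ++ [c])) out := by
  conv_lhs => rw [pvScanB]
  rw [if_neg h1, if_neg h2]

theorem pvScanB_eq (l : List Char) :
    (∀ out, pvScanB l none out = out ++ pvPost (pvChunks l)) ∧
    (∀ cur out, pvScanB l (some cur) out =
      out ++ pvPost ((cur ++ (pvGrab l).1) :: pvChunks (pvGrab l).2)) := by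
  induction hn : l.length using Nat.strong_induction_on generalizing l with
  | _ n ih =>
      cases l with
      | nil =>
          constructor
          · intro out
            rw [pvScanB_nil, pvFlushB_none, pvChunks_nil, pvPost_nil, List.append_nil]
          · intro cur out
            rw [pvScanB_nil, pvFlushB_some, pvGrab_nil, pvChunks_nil]
            simp [pvPost_cons, pvPost_nil]
      | cons c rest =>
          by_cases hU : pvU.isPrefixOf (c :: rest) = true
          · obtain ⟨r, hr⟩ := List.isPrefixOf_iff_prefix.mp hU
            have hr' : c :: rest = 'U' :: 's' :: 'e' :: 'r' :: ':' :: r := hr.symm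
            rw [hr'] at hn ⊢
            have hlen : r.length < n := by
              simp only [List.length_cons] at hn; omega
            have IH := ih r.length hlen r rfl
            constructor
            · intro out
              rw [pvScanB_U, pvFlushB_none, IH.2 [] out, pvChunks_U]
              simp [pvPost_cons]
            · intro cur out
              rw [pvScanB_U, pvFlushB_some, IH.2 [] _,
                  pvGrab_cons_pos _ _ (Or.inl (pvPrefU r)), pvChunks_U]
              simp [pvPost_cons, List.append_assoc]
          · by_cases hA : pvA.isPrefixOf (c :: rest) = true
            · obtain ⟨r, hr⟩ := List.isPrefixOf_iff_prefix.mp hA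
              have hr' : c :: rest =
                  'A' :: 's' :: 's' :: 'i' :: 's' :: 't' :: 'a' :: 'n' :: 't' :: ':' :: r := hr.symm
              rw [hr'] at hn ⊢
              have hlen : r.length < n := by
                simp only [List.length_cons] at hn; omega
              have IH := ih r.length hlen r rfl
              constructor
              · intro out
                rw [pvScanB_A, pvFlushB_none, IH.1 out, pvChunks_A]
              · intro cur out
                rw [pvScanB_A, pvFlushB_some, IH.1 _,
                    pvGrab_cons_pos _ _ (Or.inr (pvPrefA r)), pvChunks_A]
                simp [pvPost_cons, List.append_assoc]
            · have hlen : rest.length < n := by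
                simp only [List.length_cons] at hn; omega
              have IH := ih rest.length hlen rest rfl
              constructor
              · intro out
                rw [pvScanB_C _ _ _ _ hU hA,
                    show (none : Option (List Char)).map (fun cs => cs ++ [c]) = none from rfl,
                    IH.1 out, pvChunks_C _ _ hU hA]
              · intro cur out
                rw [pvScanB_C _ _ _ _ hU hA,
                    show (some cur).map (fun cs => cs ++ [c]) = some (cur ++ [c]) from rfl,
                    IH.2 _ _, pvGrab_cons_neg _ _ hU hA]
                simp [pvPost_cons, List.append_assoc]

-- ===== VERDICT (by name: the statement is the Claim_ definition above) =====
theorem extract_user_messages_from_context_py_spec : Claim_equal_extract_user_messages_from_context_py := by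
  unfold Claim_equal_extract_user_messages_from_context_py
  intro context _
  unfold Spec_extract_user_messages_from_context_py
  unfold extract_user_messages_from_context_py extract_user_messages_from_context_py_alt
  by_cases hc : context = "" ∨ context = "No previous conversation context"
  · rw [if_pos hc, if_pos hc]
  · rw [if_neg hc, if_neg hc]
    simp only []
    rw [pvSplit_eq_splitOn pvA context.toList (by decide)]
    rw [PySem.List.foldl_congr_mem (pvSplit pvA context.toList) _
          (fun acc sec => acc ++ pvPost ((pvSplit pvU sec).tail)) []
          (by
            intro acc sec _
            by_cases hin : PySem.Chars.isIn pvU sec = true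
            · rw [if_pos hin]
              simp only []
              rw [pvSplit_eq_splitOn pvU sec (by decide), List.drop_one,
                  PySem.List.foldl_append_ite
                    (p := fun part => PySem.Chars.strip part ≠ [])
                    (f := PySem.Chars.strip)]
              rfl
            · rw [if_neg hin]
              show acc = acc ++ pvPost ((pvSplit pvU sec).tail)
              rw [pvSplit_of_not_isIn pvU sec (by simpa using hin)]
              simp [pvPost_nil])]
    rw [PySem.List.foldl_append_eq_flatMap, pvPost_flatMap]
    rw [show (pvSplit pvA context.toList).flatMap (fun sec => (pvSplit pvU sec).tail) =
          pvF context.toList from rfl,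
        (pvMain context.toList).1,
        (pvScanB_eq context.toList).1 []]
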